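-- pv_equiv track=rewrite | github.com/darioradio1man/yandex_training | lesson3/alien_genom.py | alien_genoms_set
-- ===== SOURCE A (Python) =====
-- def alien_genoms_set(a: str, b: str) -> int:
--     x1, x2 = set(), set()
--     count = 0
--     for i in range(len(a) - 1):
--         x1.add(a[i:i+2])
--     for i in range(len(b) - 1):
--         x2.add(b[i:i+2])
--     intrsct = x1.intersection(x2)
--     for i in range(len(a) - 1):
--         if a[i:i+2] in intrsct:
--             count += 1
--     return count
-- ===== SOURCE B (Python) =====
-- def alien_genoms_set(a: str, b: str) -> int:
--     counts = {}
--     for i in range(len(a) - 1):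
--         g = a[i:i+2]
--         counts[g] = counts.get(g, 0) + 1
--     total = 0
--     for i in range(len(b) - 1):
--         total += counts.pop(b[i:i+2], 0)
--     return total
-- ===== Notes on version B (the rewrite author's own statement) =====
-- stated objective: alternative
-- what changed: Replaces A's two bigram sets plus an intersection-membership pass over a's positions with a bigram-frequency dictionary of a and a single accumulation pass over b that pops each bigram's count once; no set intersection and no counting loop over a remain.
import Mathlib
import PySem

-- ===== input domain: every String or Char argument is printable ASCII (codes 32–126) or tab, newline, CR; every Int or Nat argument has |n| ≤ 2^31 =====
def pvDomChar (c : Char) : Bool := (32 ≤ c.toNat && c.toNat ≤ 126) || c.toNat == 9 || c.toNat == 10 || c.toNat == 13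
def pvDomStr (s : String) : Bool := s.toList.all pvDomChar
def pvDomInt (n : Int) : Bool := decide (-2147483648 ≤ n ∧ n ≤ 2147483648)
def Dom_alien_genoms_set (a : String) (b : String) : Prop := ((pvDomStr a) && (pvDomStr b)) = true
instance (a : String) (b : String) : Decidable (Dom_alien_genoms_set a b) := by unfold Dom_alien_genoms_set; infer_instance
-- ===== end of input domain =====

-- B replaces A's two bigram sets and their intersection pass over a's positions with a
-- bigram-frequency dictionary of a and one accumulation pass over b popping each count once
-- (alternative algorithm, same asymptotic cost).

-- ===== PORT A =====
def alien_genoms_set (a : String) (b : String) : Int :=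
  let la := a.toList
  let lb := b.toList
  let x1 : PySem.Set (List Char) :=
    (PySem.List.pyRange 0 ((la.length : Int) - 1) 1).foldl
      (fun s i => PySem.Set.add s (PySem.Chars.slice la (some i) (some (i + 2)))) PySem.Set.empty
  let x2 : PySem.Set (List Char) :=
    (PySem.List.pyRange 0 ((lb.length : Int) - 1) 1).foldl
      (fun s i => PySem.Set.add s (PySem.Chars.slice lb (some i) (some (i + 2)))) PySem.Set.empty
  let intrsct := PySem.Set.inter x1 x2
  (PySem.List.pyRange 0 ((la.length : Int) - 1) 1).foldl
    (fun count i =>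
      if PySem.Set.contains intrsct (PySem.Chars.slice la (some i) (some (i + 2))) then count + 1
      else count) 0

-- ===== PORT B =====
def alien_genoms_set_alt (a : String) (b : String) : Int :=
  let la := a.toList
  let lb := b.toList
  let counts : PySem.Dict (List Char) Int :=
    (PySem.List.pyRange 0 ((la.length : Int) - 1) 1).foldl
      (fun d i =>
        let g := PySem.Chars.slice la (some i) (some (i + 2))
        d.insert g (d.getD g 0 + 1)) PySem.Dict.empty
  ((PySem.List.pyRange 0 ((lb.length : Int) - 1) 1).foldl
      (fun (st : PySem.Dict (List Char) Int × Int) i =>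
        match st.1.pop? (PySem.Chars.slice lb (some i) (some (i + 2))) with
        | some vd => (vd.2, st.2 + vd.1)
        | none => (st.1, st.2)) (counts, 0)).2

-- ===== PRECONDITION & SPEC =====
def Spec_alien_genoms_set (a : String) (b : String) (out : Int) : Prop := out = alien_genoms_set_alt a b
instance (a : String) (b : String) (out : Int) : Decidable (Spec_alien_genoms_set a b out) := by unfold Spec_alien_genoms_set; infer_instance

-- ===== CLAIM (what is proved, stated in full; the proofs are below) =====
def Claim_equal_alien_genoms_set : Prop := ∀ (a : String) (b : String), Dom_alien_genoms_set a b → Spec_alien_genoms_set a b (alien_genoms_set a b)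

-- ===== LEMMAS AND PROOFS =====

-- the list of bigram windows of l, in position order
def pvWins (l : List Char) : List (List Char) :=
  (PySem.List.pyRange 0 ((l.length : Int) - 1) 1).map
    (fun i => PySem.Chars.slice l (some i) (some (i + 2)))

-- membership in the fold-built bigram set of l is membership in the window list
lemma mem_fold_set (l : List Char) (x : List Char) :
    x ∈ (PySem.List.pyRange 0 ((l.length : Int) - 1) 1).foldl
        (fun s i => PySem.Set.add s (PySem.Chars.slice l (some i) (some (i + 2))))
        (PySem.Set.empty : PySem.Set (List Char))
      ↔ x ∈ pvWins l := by
  rw [← PySem.Set.update_map_eq_foldl_add]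
  rw [show PySem.Set.empty = ([] : PySem.Set (List Char)) from rfl, PySem.Set.update_nil_left,
    PySem.Set.mem_ofList]
  rw [pvWins]

-- a countP over the window list is a countP over the position range
lemma countP_wins (l : List Char) (p : List Char → Bool) :
    (pvWins l).countP p
      = (PySem.List.pyRange 0 ((l.length : Int) - 1) 1).countP
          (fun i => p (PySem.Chars.slice l (some i) (some (i + 2)))) := by
  rw [pvWins, List.countP_map]
  rfl

-- A counts the positions of a whose window is also a window of b
lemma A_eq_countP (a b : String) :
    alien_genoms_set a b
      = ((pvWins a.toList).countP (fun w => decide (w ∈ pvWins b.toList)) : Int) := by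
  unfold alien_genoms_set
  rw [PySem.List.foldl_ite_add_one, Int.zero_add,
    countP_wins a.toList (fun w => decide (w ∈ pvWins b.toList)), Int.natCast_inj]
  apply List.countP_congr
  intro i hi
  simp only [decide_eq_true_eq]
  rw [PySem.Set.contains_iff, PySem.Set.mem_inter, mem_fold_set a.toList, mem_fold_set b.toList]
  constructor
  · rintro ⟨_, h⟩
    exact h
  · intro h
    refine ⟨?_, h⟩
    rw [pvWins]
    exact List.mem_map_of_mem hi

-- with unique keys, removing the (unique) entry at x splits the membership-filtered value sum
lemma split_sum (L : List (List Char × Int)) (x : List Char) (v : Int) (xs : List (List Char))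
    (hnd : (L.map Prod.fst).Nodup) (hm : (x, v) ∈ L) :
    ((L.filter (fun kv => decide (kv.1 = x) || decide (kv.1 ∈ xs))).map (·.2)).sum
      = v + ((L.filter (fun kv => decide (kv.1 ∈ xs) && !(kv.1 == x))).map (·.2)).sum := by
  induction L with
  | nil => cases hm
  | cons kv L ih =>
    simp only [List.map_cons, List.nodup_cons] at hnd
    by_cases hk : kv.1 = x
    · have hnot : ∀ p ∈ L, p.1 ≠ x := by
        intro p hp hpx
        exact hnd.1 (by rw [hk, ← hpx]; exact List.mem_map_of_mem hp)
      have hkv : kv = (x, v) := by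
        rcases List.mem_cons.mp hm with h | h
        · exact h.symm
        · exact absurd rfl (hnot _ h)
      have h1 : L.filter (fun kv => decide (kv.1 = x) || decide (kv.1 ∈ xs))
          = L.filter (fun kv => decide (kv.1 ∈ xs)) := by
        apply List.filter_congr
        intro p hp
        simp [hnot p hp]
      have h2 : L.filter (fun kv => decide (kv.1 ∈ xs) && !(kv.1 == x))
          = L.filter (fun kv => decide (kv.1 ∈ xs)) := by
        apply List.filter_congr
        intro p hp
        simp [hnot p hp]
      subst hkv
      simp [h1, h2]
    · have hm' : (x, v) ∈ L := by
        rcases List.mem_cons.mp hm with h | h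
        · exact absurd (congrArg Prod.fst h.symm) hk
        · exact h
      have ihL := ih hnd.2 hm'
      by_cases hin : kv.1 ∈ xs
      · simp only [List.filter_cons]
        simp [hk, hin, ihL]
        ring
      · simp only [List.filter_cons]
        simp [hk, hin, ihL]

-- keys of an erase stay unique
lemma nodup_keys_erase (d : PySem.Dict (List Char) Int) (x : List Char)
    (hnd : d.keys.Nodup) : (d.erase x).keys.Nodup := by
  have hsub : (d.erase x).items.Sublist d.items := List.filter_sublist
  exact (hsub.map Prod.fst).nodup hnd

-- the pop-accumulate loop sums the values of d whose key occurs in xs (each counted once)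
lemma pop_fold (xs : List (List Char)) (d : PySem.Dict (List Char) Int) (t : Int)
    (hnd : d.keys.Nodup) :
    (xs.foldl
        (fun (st : PySem.Dict (List Char) Int × Int) g =>
          match st.1.pop? g with
          | some vd => (vd.2, st.2 + vd.1)
          | none => (st.1, st.2)) (d, t)).2
      = t + ((d.items.filter (fun kv => decide (kv.1 ∈ xs))).map (·.2)).sum := by
  induction xs generalizing d t with
  | nil => simp
  | cons x xs ih =>
    rw [List.foldl_cons]
    rcases hg : d.get? x with _ | v
    · have hstep : (match d.pop? x with
          | some vd => (vd.2, t + vd.1)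
          | none => (d, t)) = (d, t) := by
        simp [PySem.Dict.pop?, hg]
      have hf : d.items.filter (fun kv => decide (kv.1 ∈ x :: xs))
          = d.items.filter (fun kv => decide (kv.1 ∈ xs)) := by
        apply List.filter_congr
        intro kv hkv
        have hne : kv.1 ≠ x := by
          intro h
          exact ((PySem.Dict.get?_eq_none_iff_not_mem_keys d x).mp hg)
            (h ▸ PySem.Dict.mem_keys_of_mem_items d hkv)
        simp [List.mem_cons, hne]
      rw [hstep, ih d t hnd, hf]
    · have hstep : (match d.pop? x with
          | some vd => (vd.2, t + vd.1)
          | none => (d, t)) = (d.erase x, t + v) := by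
        simp [PySem.Dict.pop?, hg]
      rw [hstep, ih (d.erase x) (t + v) (nodup_keys_erase d x hnd)]
      have hm : (x, v) ∈ d.items := PySem.Dict.mem_items_of_get?_eq_some d hg
      have herase : (d.erase x).items = d.items.filter (fun kv => !(kv.1 == x)) := rfl
      have hmemc : (fun (kv : List Char × Int) => decide (kv.1 ∈ x :: xs))
          = fun kv => decide (kv.1 = x) || decide (kv.1 ∈ xs) := by
        funext kv
        simp [List.mem_cons]
      rw [herase, List.filter_filter, hmemc, split_sum d.items x v xs hnd hm]
      ring

-- the counter loop of B builds the bigram counter of a's window list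
lemma counts_eq (la : List Char) :
    (PySem.List.pyRange 0 ((la.length : Int) - 1) 1).foldl
        (fun d i =>
          let g := PySem.Chars.slice la (some i) (some (i + 2))
          d.insert g (d.getD g 0 + 1)) PySem.Dict.empty
      = PySem.Dict.counter (pvWins la) := by
  rw [← PySem.Dict.foldl_insert_getD_add_one_eq_counter, pvWins, List.foldl_map]

-- the accumulation loop of B over positions of b is the pop-accumulate loop over b's windows
lemma pop_fold_map (lb : List Char) (st0 : PySem.Dict (List Char) Int × Int) :
    (PySem.List.pyRange 0 ((lb.length : Int) - 1) 1).foldl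
        (fun (st : PySem.Dict (List Char) Int × Int) i =>
          match st.1.pop? (PySem.Chars.slice lb (some i) (some (i + 2))) with
          | some vd => (vd.2, st.2 + vd.1)
          | none => (st.1, st.2)) st0
      = (pvWins lb).foldl
        (fun (st : PySem.Dict (List Char) Int × Int) g =>
          match st.1.pop? g with
          | some vd => (vd.2, st.2 + vd.1)
          | none => (st.1, st.2)) st0 := by
  rw [pvWins, List.foldl_map]

-- summing each distinct window's multiplicity over the windows present in wb is the countP
lemma sum_counts_eq_countP (wa wb : List (List Char)) :
    ((((PySem.Set.ofList wa).filter (fun k => decide (k ∈ wb))).map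
        (fun k => (wa.count k : Int)))).sum
      = (wa.countP (fun w => decide (w ∈ wb)) : Int) := by
  have hperm : ((PySem.Set.ofList wa).filter (fun k => decide (k ∈ wb))).Perm
      (wa.dedup.filter (fun k => decide (k ∈ wb))) := by
    apply List.Perm.filter
    apply List.perm_of_nodup_nodup_toFinset_eq (PySem.Set.nodup_ofList wa) wa.nodup_dedup
    ext y
    simp [PySem.Set.mem_ofList, List.mem_dedup]
  have hc : ∀ k : List Char,
      @List.count (List Char) List.instBEq k wa
        = @List.count (List Char) instBEqOfDecidableEq k wa := by
    intro k
    rw [@List.count_eq_countP, @List.count_eq_countP]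
    apply List.countP_congr
    intro y _
    simp
  rw [(hperm.map (fun k => (wa.count k : Int))).sum_eq,
    ← List.sum_map_count_dedup_filter_eq_countP (fun w => decide (w ∈ wb)) wa]
  push_cast [Nat.cast_list_sum]
  rw [List.map_map]
  simp only [Function.comp_def, hc]

-- ===== VERDICT (by name: the statement is the Claim_ definition above) =====
theorem alien_genoms_set_spec : Claim_equal_alien_genoms_set := by
  intro a b _
  unfold Spec_alien_genoms_set
  rw [A_eq_countP]
  unfold alien_genoms_set_alt
  simp only []
  rw [counts_eq a.toList, pop_fold_map b.toList,
    pop_fold _ _ _ (PySem.Dict.nodup_keys_counter (pvWins a.toList)),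
    PySem.Dict.items_counter, List.filter_map, List.map_map, Int.zero_add]
  exact (sum_counts_eq_countP (pvWins a.toList) (pvWins b.toList)).symm
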